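-- pv_equiv track=rewrite | github.com/IlyaZh/budgetBot | Bot.py | format_books_list
-- ===== SOURCE A (Python) =====
-- def format_books_list(books):
--     msg = "Ваши книги:\r\n"
--     count = 0;
--     book_list = []
--     for book in books:
--         count += 1
--         book_name = book.get('name', "*Странное название*")
--         msg += "{:d}) {:s}\r\n".format(count, book_name)
--         book_list.append(book_name)
--     msg += "\r\n<b>Какую выберите? Введите номер или нажмите кнопку</b>"
--     return [count, msg, book_list]
-- ===== SOURCE B (Python) =====
-- def format_books_list(books):
--     def rec(bs, i):
--         # returns (message body for bs numbered from i, their names), built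
--         # back-to-front on return from the recursion
--         if not bs:
--             return ("", [])
--         name = bs[0].get('name', "*Странное название*")
--         body, names = rec(bs[1:], i + 1)
--         return ("{:d}) {:s}\r\n".format(i, name) + body, [name] + names)
--     body, names = rec(books, 1)
--     msg = "Ваши книги:\r\n" + body + "\r\n<b>Какую выберите? Введите номер или нажмите кнопку</b>"
--     return [len(names), msg, names]
-- ===== Notes on version B (the rewrite author's own statement) =====
-- stated objective: alternative
-- what changed: Replaces A's iterative loop with three mutable accumulators (count, growing msg string, appended list) by a structural recursion that returns the body and name list built back-to-front by prepending on return, with the count taken as len at the end.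
import Mathlib
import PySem

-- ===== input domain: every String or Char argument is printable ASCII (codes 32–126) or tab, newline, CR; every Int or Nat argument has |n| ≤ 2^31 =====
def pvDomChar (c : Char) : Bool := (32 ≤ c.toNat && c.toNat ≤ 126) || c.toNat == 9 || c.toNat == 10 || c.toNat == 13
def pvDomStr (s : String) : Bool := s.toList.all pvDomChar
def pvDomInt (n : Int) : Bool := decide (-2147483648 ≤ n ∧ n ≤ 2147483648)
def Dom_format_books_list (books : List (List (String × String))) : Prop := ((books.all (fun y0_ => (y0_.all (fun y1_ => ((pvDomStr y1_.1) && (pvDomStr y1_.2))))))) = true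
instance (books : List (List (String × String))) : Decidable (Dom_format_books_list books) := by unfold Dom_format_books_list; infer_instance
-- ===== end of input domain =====

-- B replaces A's accumulator loop by a structural recursion building the body and names back-to-front (objective: alternative).

-- shared helper: Python dict.get(k, default) on an association list (first match)
def pyDictGetD (d : List (String × String)) (k : String) (dflt : String) : String :=
  ((d.find? (fun p => p.1 == k)).map (·.2)).getD dflt

-- ===== PORT A =====
def format_books_list (books : List (List (String × String))) : Int × String × List String :=
  let st := books.foldl (fun (st : Int × String × List String) book =>
      let count := st.1 + 1
      let book_name := pyDictGetD book "name" "*Странное название*"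
      (count, st.2.1 ++ PySem.Int.toStr count ++ ") " ++ book_name ++ "\r\n", st.2.2 ++ [book_name]))
    ((0 : Int), "Ваши книги:\r\n", ([] : List String))
  (st.1, st.2.1 ++ "\r\n<b>Какую выберите? Введите номер или нажмите кнопку</b>", st.2.2)

-- ===== PORT B =====
-- rec(bs, i): the numbered body for bs starting at i, and their names, built by prepending on return
def fblRec : List (List (String × String)) → Int → String × List String
  | [], _ => ("", [])
  | b :: bs, i =>
    let name := pyDictGetD b "name" "*Странное название*"
    let r := fblRec bs (i + 1)
    (PySem.Int.toStr i ++ ") " ++ name ++ "\r\n" ++ r.1, name :: r.2)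

def format_books_list_alt (books : List (List (String × String))) : Int × String × List String :=
  let r := fblRec books 1
  ((r.2.length : Int), "Ваши книги:\r\n" ++ r.1 ++ "\r\n<b>Какую выберите? Введите номер или нажмите кнопку</b>", r.2)

-- ===== PRECONDITION & SPEC =====
def Spec_format_books_list (books : List (List (String × String))) (out : Int × String × List String) : Prop := out = format_books_list_alt books
instance (books : List (List (String × String))) (out : Int × String × List String) : Decidable (Spec_format_books_list books out) := by unfold Spec_format_books_list; infer_instance

-- ===== CLAIM =====
def Claim_equal_format_books_list : Prop := ∀ (books : List (List (String × String))), Dom_format_books_list books → Spec_format_books_list books (format_books_list books)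

-- ===== LEMMAS AND PROOFS =====
theorem fblRec_len (books : List (List (String × String))) : ∀ (i : Int),
    (fblRec books i).2.length = books.length := by
  induction books with
  | nil => intro i; simp [fblRec]
  | cons b bs ih => intro i; simp [fblRec, ih]

theorem fbl_fold_eq (books : List (List (String × String))) : ∀ (c : Int) (msg : String) (bl : List String),
    books.foldl (fun (st : Int × String × List String) book =>
      let count := st.1 + 1
      let book_name := pyDictGetD book "name" "*Странное название*"
      (count, st.2.1 ++ PySem.Int.toStr count ++ ") " ++ book_name ++ "\r\n", st.2.2 ++ [book_name]))
      (c, msg, bl)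
    = (c + books.length, msg ++ (fblRec books (c + 1)).1, bl ++ (fblRec books (c + 1)).2) := by
  induction books with
  | nil => intro c msg bl; simp [fblRec]
  | cons b bs ih =>
    intro c msg bl
    simp only [List.foldl_cons, fblRec, List.length_cons]
    rw [ih]
    refine Prod.ext (by push_cast; ring) (Prod.ext ?_ (by simp))
    show msg ++ PySem.Int.toStr (c + 1) ++ ") " ++ _ ++ "\r\n" ++ (fblRec bs (c + 1 + 1)).1 = _
    simp [String.append_assoc]

theorem format_books_list_eq (books : List (List (String × String))) :
    format_books_list books = format_books_list_alt books := by
  unfold format_books_list format_books_list_alt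
  rw [fbl_fold_eq]
  simp [fblRec_len]

-- ===== VERDICT =====
theorem format_books_list_spec : Claim_equal_format_books_list := by
  intro books _
  unfold Spec_format_books_list
  exact format_books_list_eq books
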